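-- pv_equiv track=rewrite | github.com/MetaCoding-io/SemPKM | backend/app/events/query.py | get_primary_operation
-- ===== SOURCE A (Python) =====
-- _OP_PRIORITY = [
--     "object.create",
--     "object.patch",
--     "body.set",
--     "edge.create",
--     "edge.patch",
--     "edge.create.undo",
-- ]
--
-- def get_primary_operation(op_type_str: str) -> tuple[str, list[str]]:
--     """Extract the primary operation from a possibly compound operation type.
--
--     Splits on commas and returns (primary_op, secondary_ops) where primary_op
--     is the highest-priority operation found, and secondary_ops are the rest.
--     If only one operation, returns (op, []).
--     """
--     parts = [p.strip() for p in op_type_str.split(",") if p.strip()]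
--     if len(parts) <= 1:
--         return (parts[0] if parts else op_type_str, [])
--     # Find highest-priority operation
--     for candidate in _OP_PRIORITY:
--         if candidate in parts:
--             remaining = [p for p in parts if p != candidate]
--             return (candidate, remaining)
--     # Fallback: first part is primary
--     return (parts[0], parts[1:])
-- ===== SOURCE B (Python) =====
-- _OP_PRIORITY = [
--     "object.create",
--     "object.patch",
--     "body.set",
--     "edge.create",
--     "edge.patch",
--     "edge.create.undo",
-- ]
--
-- _PRIO = {op: i for i, op in enumerate(_OP_PRIORITY)}
--
--
-- def get_primary_operation(op_type_str: str) -> tuple[str, list[str]]: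
--     """One pass over the parts with a rank table instead of scanning the
--     priority list against the parts."""
--     parts = [p.strip() for p in op_type_str.split(",") if p.strip()]
--     if len(parts) <= 1:
--         return (parts[0] if parts else op_type_str, [])
--     best = None  # (rank, op) with the smallest rank seen so far
--     for p in parts:
--         r = _PRIO.get(p)
--         if r is not None and (best is None or r < best[0]):
--             best = (r, p)
--     if best is None:
--         return (parts[0], parts[1:])
--     primary = best[1]
--     return (primary, [p for p in parts if p != primary])
-- ===== Notes on version B (the rewrite author's own statement) =====
-- stated objective: alternative
-- what changed: A scans the fixed priority list and tests each candidate for membership in the parts; B makes one pass over the parts, looking each part up in a precomputed op->rank dict and keeping the lowest-ranked one.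
import Mathlib
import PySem

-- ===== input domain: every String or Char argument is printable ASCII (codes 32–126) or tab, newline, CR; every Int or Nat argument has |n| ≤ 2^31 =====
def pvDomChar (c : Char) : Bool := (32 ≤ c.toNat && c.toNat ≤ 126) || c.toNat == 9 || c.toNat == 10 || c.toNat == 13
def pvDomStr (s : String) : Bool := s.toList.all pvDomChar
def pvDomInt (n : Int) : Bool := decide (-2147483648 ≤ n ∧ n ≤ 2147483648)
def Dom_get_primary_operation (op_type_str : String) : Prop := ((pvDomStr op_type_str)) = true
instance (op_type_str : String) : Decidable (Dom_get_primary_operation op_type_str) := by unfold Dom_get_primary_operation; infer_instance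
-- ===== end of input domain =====

-- B replaces A's scan of the priority list (with an `in parts` test per candidate) by a single
-- pass over the parts keeping the best (lowest-rank) op found via a precomputed rank dict; same value everywhere.

-- ===== PORT A =====
def opPriority : List String :=
  ["object.create", "object.patch", "body.set", "edge.create", "edge.patch", "edge.create.undo"]

-- the 'for candidate in _OP_PRIORITY' loop with its early return
def findPrimaryA (parts : List String) : List String → String × List String
  | [] => (parts.headD "", parts.drop 1)          -- fallback: (parts[0], parts[1:]); parts nonempty here
  | c :: cs =>
      if c ∈ parts then (c, parts.filter (fun p => p ≠ c))
      else findPrimaryA parts cs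

def get_primary_operation (op_type_str : String) : String × List String :=
  let parts := (((PySem.Str.split? op_type_str ",").getD []).map PySem.Str.strip).filter (fun p => p ≠ "")
  if parts.length ≤ 1 then (parts.headD op_type_str, [])
  else findPrimaryA parts opPriority

-- ===== PORT B =====
-- _PRIO = {op: i for i, op in enumerate(_OP_PRIORITY)}
def prioDict : PySem.Dict String Int :=
  (PySem.List.enumerate opPriority).foldl (fun d p => d.insert p.2 p.1) PySem.Dict.empty

-- body of B's 'for p in parts' loop
def bestStep (best : Option (Int × String)) (p : String) : Option (Int × String) :=
  match prioDict.get? p with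
  | none => best
  | some r =>
      match best with
      | none => some (r, p)
      | some b => if r < b.1 then some (r, p) else best

def get_primary_operation_alt (op_type_str : String) : String × List String :=
  let parts := (((PySem.Str.split? op_type_str ",").getD []).map PySem.Str.strip).filter (fun p => p ≠ "")
  if parts.length ≤ 1 then (parts.headD op_type_str, [])
  else
    match parts.foldl bestStep none with
    | none => (parts.headD "", parts.drop 1)
    | some b => (b.2, parts.filter (fun p => p ≠ b.2))

-- ===== PRECONDITION & SPEC =====
def Spec_get_primary_operation (op_type_str : String) (out : String × List String) : Prop := out = get_primary_operation_alt op_type_str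
instance (op_type_str : String) (out : String × List String) : Decidable (Spec_get_primary_operation op_type_str out) := by unfold Spec_get_primary_operation; infer_instance

-- ===== CLAIM (what is proved, stated in full; the proofs are below) =====
def Claim_equal_get_primary_operation : Prop := ∀ (op_type_str : String), Dom_get_primary_operation op_type_str → Spec_get_primary_operation op_type_str (get_primary_operation op_type_str)

-- ===== LEMMAS AND PROOFS =====

-- rank of a string: its index in opPriority, as B's dict lookup computes it
def rankStr (p : String) : Option Int :=
  if p = "object.create" then some 0
  else if p = "object.patch" then some 1
  else if p = "body.set" then some 2
  else if p = "edge.create" then some 3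
  else if p = "edge.patch" then some 4
  else if p = "edge.create.undo" then some 5
  else none

def opAt (k : Int) : String :=
  if k = 0 then "object.create"
  else if k = 1 then "object.patch"
  else if k = 2 then "body.set"
  else if k = 3 then "edge.create"
  else if k = 4 then "edge.patch"
  else if k = 5 then "edge.create.undo"
  else ""

def phi (m : Option Int) : Option (Int × String) := m.map (fun k => (k, opAt k))

def mergeL (m : Option Int) (r : Option Int) : Option Int :=
  match r with
  | none => m
  | some k => some (match m with | none => k | some a => min a k)

lemma get?_prioDict (p : String) : prioDict.get? p = rankStr p := by
  have hd : prioDict = PySem.Dict.mk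
      [("object.create", 0), ("object.patch", 1), ("body.set", 2),
       ("edge.create", 3), ("edge.patch", 4), ("edge.create.undo", 5)] := by decide
  rw [hd]
  simp only [PySem.Dict.get?_mk_cons, rankStr, beq_iff_eq]
  by_cases h0 : p = "object.create" <;> by_cases h1 : p = "object.patch" <;>
  by_cases h2 : p = "body.set" <;> by_cases h3 : p = "edge.create" <;>
  by_cases h4 : p = "edge.patch" <;> by_cases h5 : p = "edge.create.undo" <;>
  simp_all [eq_comm, PySem.Dict.get?]

lemma rankStr_cases (p : String) :
    rankStr p = none ∨ ∃ k, rankStr p = some k ∧ 0 ≤ k ∧ k < 6 ∧ p = opAt k := by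
  unfold rankStr
  by_cases h0 : p = "object.create"; · exact Or.inr ⟨0, by simp [h0, opAt]⟩
  by_cases h1 : p = "object.patch"; · exact Or.inr ⟨1, by simp [h1, opAt]⟩
  by_cases h2 : p = "body.set"; · exact Or.inr ⟨2, by simp [h2, opAt]⟩
  by_cases h3 : p = "edge.create"; · exact Or.inr ⟨3, by simp [h3, opAt]⟩
  by_cases h4 : p = "edge.patch"; · exact Or.inr ⟨4, by simp [h4, opAt]⟩
  by_cases h5 : p = "edge.create.undo"; · exact Or.inr ⟨5, by simp [h5, opAt]⟩
  exact Or.inl (by simp [h0, h1, h2, h3, h4, h5])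

lemma rankStr_opAt (k : Int) (h0 : 0 ≤ k) (h6 : k < 6) : rankStr (opAt k) = some k := by
  interval_cases k <;> decide

lemma bestStep_phi (m : Option Int) (p : String) :
    bestStep (phi m) p = phi (mergeL m (rankStr p)) := by
  unfold bestStep mergeL
  rw [get?_prioDict]
  rcases rankStr_cases p with h | ⟨k, h, hk0, hk6, hp⟩
  · simp [h]
  · cases m with
    | none =>
        subst hp
        simp [h, phi]
    | some a =>
        simp only [h, phi, Option.map_some]
        rcases min_cases a k with ⟨he, hc⟩ | ⟨he, hc⟩
        · rw [if_neg (by omega), he]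
        · rw [if_pos hc, he, hp]

lemma foldl_phi (parts : List String) : ∀ m : Option Int,
    parts.foldl bestStep (phi m) = phi (parts.foldl (fun m p => mergeL m (rankStr p)) m) := by
  induction parts with
  | nil => intro m; rfl
  | cons p l ih =>
      intro m
      simp only [List.foldl_cons, bestStep_phi]
      exact ih _

lemma G_cases (parts : List String) : ∀ (m : Option Int) (k : Int),
    parts.foldl (fun m p => mergeL m (rankStr p)) m = some k →
    m = some k ∨ (0 ≤ k ∧ k < 6 ∧ opAt k ∈ parts) := by
  induction parts with
  | nil => intro m k h; exact Or.inl h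
  | cons p l ih =>
      intro m k h
      simp only [List.foldl_cons] at h
      rcases ih _ _ h with h' | ⟨hk0, hk6, hmem⟩
      · rcases rankStr_cases p with hr | ⟨r, hr, hr0, hr6, hp⟩
        · rw [hr] at h'; exact Or.inl h'
        · rw [hr] at h'
          cases m with
          | none =>
              simp only [mergeL, Option.some.injEq] at h'
              subst h'
              exact Or.inr ⟨hr0, hr6, by simp [← hp]⟩
          | some a =>
              simp only [mergeL, Option.some.injEq] at h'
              rcases min_cases a r with ⟨he, _⟩ | ⟨he, _⟩
              · exact Or.inl (by rw [← h', he])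
              · refine Or.inr ?_
                rw [← h', he]
                exact ⟨hr0, hr6, by simp [← hp]⟩
      · exact Or.inr ⟨hk0, hk6, List.mem_cons_of_mem _ hmem⟩

lemma G_mono (l : List String) : ∀ a : Int,
    ∃ k, l.foldl (fun m p => mergeL m (rankStr p)) (some a) = some k ∧ k ≤ a := by
  induction l with
  | nil => intro a; exact ⟨a, rfl, le_refl a⟩
  | cons p l ih =>
      intro a
      simp only [List.foldl_cons]
      cases hr : rankStr p with
      | none => simpa [mergeL, hr] using ih a
      | some r =>
          obtain ⟨k, hk, hle⟩ := ih (min a r)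
          exact ⟨k, by simpa [mergeL, hr] using hk, le_trans hle (min_le_left _ _)⟩

lemma G_min (parts : List String) : ∀ (m : Option Int) (j : Int), 0 ≤ j → j < 6 →
    opAt j ∈ parts →
    ∃ k, parts.foldl (fun m p => mergeL m (rankStr p)) m = some k ∧ k ≤ j := by
  induction parts with
  | nil => intro _ _ _ _ h; exact absurd h (List.not_mem_nil)
  | cons p l ih =>
      intro m j hj0 hj6 hmem
      simp only [List.foldl_cons]
      rcases List.mem_cons.mp hmem with he | hl
      · rw [← he, rankStr_opAt j hj0 hj6]
        cases m with
        | none =>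
            obtain ⟨k, hk, hle⟩ := G_mono l j
            exact ⟨k, by simpa [mergeL] using hk, hle⟩
        | some a =>
            obtain ⟨k, hk, hle⟩ := G_mono l (min a j)
            exact ⟨k, by simpa [mergeL] using hk, le_trans hle (min_le_right _ _)⟩
      · exact ih _ j hj0 hj6 hl

lemma main_lemma (parts : List String) :
    findPrimaryA parts opPriority =
      (match parts.foldl bestStep none with
       | none => (parts.headD "", parts.drop 1)
       | some b => (b.2, parts.filter (fun p => p ≠ b.2))) := by
  have hfold : parts.foldl bestStep none =
      phi (parts.foldl (fun m p => mergeL m (rankStr p)) none) := foldl_phi parts none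
  cases hg : parts.foldl (fun m p => mergeL m (rankStr p)) none with
  | none =>
      have hnot : ∀ j : Int, 0 ≤ j → j < 6 → opAt j ∉ parts := by
        intro j hj0 hj6 hmem
        obtain ⟨k, hk, _⟩ := G_min parts none j hj0 hj6 hmem
        rw [hg] at hk
        simp at hk
      have h0 : "object.create" ∉ parts := by simpa [opAt] using hnot 0 (by norm_num) (by norm_num)
      have h1 : "object.patch" ∉ parts := by simpa [opAt] using hnot 1 (by norm_num) (by norm_num)
      have h2 : "body.set" ∉ parts := by simpa [opAt] using hnot 2 (by norm_num) (by norm_num)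
      have h3 : "edge.create" ∉ parts := by simpa [opAt] using hnot 3 (by norm_num) (by norm_num)
      have h4 : "edge.patch" ∉ parts := by simpa [opAt] using hnot 4 (by norm_num) (by norm_num)
      have h5 : "edge.create.undo" ∉ parts := by simpa [opAt] using hnot 5 (by norm_num) (by norm_num)
      rw [hfold, hg]
      simp [findPrimaryA, opPriority, phi, h0, h1, h2, h3, h4, h5]
  | some k =>
      rcases G_cases parts none k hg with h | ⟨hk0, hk6, hmem⟩
      · simp at h
      have hnot : ∀ j : Int, 0 ≤ j → j < 6 → j < k → opAt j ∉ parts := by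
        intro j hj0 hj6 hjk hmemj
        obtain ⟨k', hk', hle⟩ := G_min parts none j hj0 hj6 hmemj
        rw [hg] at hk'
        injection hk' with hv
        omega
      rw [hfold, hg]
      have hk' : k = 0 ∨ k = 1 ∨ k = 2 ∨ k = 3 ∨ k = 4 ∨ k = 5 := by omega
      rcases hk' with rfl | rfl | rfl | rfl | rfl | rfl
      · have hm : "object.create" ∈ parts := by simpa [opAt] using hmem
        simp [findPrimaryA, opPriority, phi, opAt, hm]
      · have hm : "object.patch" ∈ parts := by simpa [opAt] using hmem
        have h0 : "object.create" ∉ parts := by simpa [opAt] using hnot 0 (by norm_num) (by norm_num) (by norm_num)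
        simp [findPrimaryA, opPriority, phi, opAt, hm, h0]
      · have hm : "body.set" ∈ parts := by simpa [opAt] using hmem
        have h0 : "object.create" ∉ parts := by simpa [opAt] using hnot 0 (by norm_num) (by norm_num) (by norm_num)
        have h1 : "object.patch" ∉ parts := by simpa [opAt] using hnot 1 (by norm_num) (by norm_num) (by norm_num)
        simp [findPrimaryA, opPriority, phi, opAt, hm, h0, h1]
      · have hm : "edge.create" ∈ parts := by simpa [opAt] using hmem
        have h0 : "object.create" ∉ parts := by simpa [opAt] using hnot 0 (by norm_num) (by norm_num) (by norm_num)
        have h1 : "object.patch" ∉ parts := by simpa [opAt] using hnot 1 (by norm_num) (by norm_num) (by norm_num)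
        have h2 : "body.set" ∉ parts := by simpa [opAt] using hnot 2 (by norm_num) (by norm_num) (by norm_num)
        simp [findPrimaryA, opPriority, phi, opAt, hm, h0, h1, h2]
      · have hm : "edge.patch" ∈ parts := by simpa [opAt] using hmem
        have h0 : "object.create" ∉ parts := by simpa [opAt] using hnot 0 (by norm_num) (by norm_num) (by norm_num)
        have h1 : "object.patch" ∉ parts := by simpa [opAt] using hnot 1 (by norm_num) (by norm_num) (by norm_num)
        have h2 : "body.set" ∉ parts := by simpa [opAt] using hnot 2 (by norm_num) (by norm_num) (by norm_num)
        have h3 : "edge.create" ∉ parts := by simpa [opAt] using hnot 3 (by norm_num) (by norm_num) (by norm_num)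
        simp [findPrimaryA, opPriority, phi, opAt, hm, h0, h1, h2, h3]
      · have hm : "edge.create.undo" ∈ parts := by simpa [opAt] using hmem
        have h0 : "object.create" ∉ parts := by simpa [opAt] using hnot 0 (by norm_num) (by norm_num) (by norm_num)
        have h1 : "object.patch" ∉ parts := by simpa [opAt] using hnot 1 (by norm_num) (by norm_num) (by norm_num)
        have h2 : "body.set" ∉ parts := by simpa [opAt] using hnot 2 (by norm_num) (by norm_num) (by norm_num)
        have h3 : "edge.create" ∉ parts := by simpa [opAt] using hnot 3 (by norm_num) (by norm_num) (by norm_num)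
        have h4 : "edge.patch" ∉ parts := by simpa [opAt] using hnot 4 (by norm_num) (by norm_num) (by norm_num)
        simp [findPrimaryA, opPriority, phi, opAt, hm, h0, h1, h2, h3, h4]

-- ===== VERDICT (by name: the statement is the Claim_ definition above) =====
theorem get_primary_operation_spec : Claim_equal_get_primary_operation := by
  intro s _
  unfold Spec_get_primary_operation get_primary_operation get_primary_operation_alt
  set parts := (((PySem.Str.split? s ",").getD []).map PySem.Str.strip).filter (fun p => p ≠ "") with hp
  by_cases hl : parts.length ≤ 1
  · simp [hl]
  · simp only [hl, if_false]
    exact main_lemma parts
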